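-- pv_equiv track=rewrite | github.com/web-bro-prd/Lottery | backend/pension_recommender.py | _build_pos_counts
-- ===== SOURCE A (Python) =====
-- from collections import Counter
-- from typing import Optional
--
-- def _build_pos_counts(draws: list, recent_n: Optional[int] = None) -> list[Counter]:
--     src = draws[-recent_n:] if recent_n and len(draws) >= recent_n else draws
--     counters = [Counter() for _ in range(6)]
--     for draw in src:
--         num = str(draw["num"]).zfill(6)
--         for pos, ch in enumerate(num):
--             counters[pos][ch] += 1
--     return counters
-- ===== SOURCE B (Python) =====
-- from collections import Counter
-- from typing import Optional
--
-- def _build_pos_counts(draws: list, recent_n: Optional[int] = None) -> list[Counter]: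
--     src = draws[-recent_n:] if recent_n and len(draws) >= recent_n else draws
--     digits = [str(d["num"]).zfill(6) for d in src]
--     out = []
--     for pos in range(6):
--         col = [s[pos] for s in digits]
--         out.append(Counter({ch: col.count(ch) for ch in dict.fromkeys(col)}))
--     return out
-- ===== Notes on version B (the rewrite author's own statement) =====
-- stated objective: alternative
-- what changed: B maintains no running counts at all: per position it extracts the column, deduplicates it in first-occurrence order with dict.fromkeys, and obtains each distinct digit's count by a col.count scan (Counter built once from a dict comprehension), replacing A's single pass that increments six counters in place per draw.
import Mathlib
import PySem

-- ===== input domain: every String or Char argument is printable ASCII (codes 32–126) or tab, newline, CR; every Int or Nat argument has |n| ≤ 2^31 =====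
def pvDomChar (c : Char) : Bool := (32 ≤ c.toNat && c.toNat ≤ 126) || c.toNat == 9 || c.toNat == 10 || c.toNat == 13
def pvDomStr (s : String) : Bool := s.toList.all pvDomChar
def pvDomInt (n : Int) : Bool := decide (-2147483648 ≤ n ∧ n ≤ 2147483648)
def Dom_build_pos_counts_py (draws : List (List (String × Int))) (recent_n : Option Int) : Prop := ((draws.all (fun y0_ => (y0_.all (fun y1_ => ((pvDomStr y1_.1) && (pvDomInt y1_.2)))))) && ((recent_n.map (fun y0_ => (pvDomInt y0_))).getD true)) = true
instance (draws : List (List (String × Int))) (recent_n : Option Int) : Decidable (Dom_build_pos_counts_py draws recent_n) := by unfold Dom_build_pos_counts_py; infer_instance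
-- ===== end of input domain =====

-- B keeps no running counts: per position it dedups the column (first-occurrence order) and
-- counts each distinct digit by a scan, instead of A's single pass incrementing six counters in place; same return value.

-- helpers shared by both ports (both Python sources contain these identical expressions):
-- src = draws[-recent_n:] if recent_n and len(draws) >= recent_n else draws
def pvSrc (draws : List (List (String × Int))) (recent_n : Option Int) : List (List (String × Int)) :=
  match recent_n with
  | some n => if n ≠ 0 ∧ n ≤ (draws.length : Int) then PySem.List.slice draws (some (-n)) none else draws
  | none => draws

-- d["num"]; the KeyError case (no "num" key) is excluded by Pre_build_pos_counts_py
def pvNum (d : List (String × Int)) : Int := (List.lookup "num" d).getD 0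

-- str.zfill(w): sign-aware left zero padding, ported by hand (exact for str(int) input)
def pvZfill (s : List Char) (w : Nat) : List Char :=
  if w ≤ s.length then s
  else match s with
    | '-' :: rest => '-' :: (List.replicate (w - s.length) '0' ++ rest)
    | '+' :: rest => '+' :: (List.replicate (w - s.length) '0' ++ rest)
    | _ => List.replicate (w - s.length) '0' ++ s

-- str(d["num"]).zfill(6)
def pvDigits (d : List (String × Int)) : List Char := pvZfill (PySem.Int.toChars (pvNum d)) 6

-- ===== PORT A =====
-- counters[pos][ch] += 1  (indexed store into the list of counters)
def pvStepA (cs : List (PySem.Dict String Int)) (p : Int × Char) : List (PySem.Dict String Int) :=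
  PySem.List.pySetD cs p.1
    ((PySem.List.pyGetD cs p.1 PySem.Dict.empty).modify (String.singleton p.2) 0 (· + 1))

def build_pos_counts_py (draws : List (List (String × Int))) (recent_n : Option Int) : List (List (String × Int)) :=
  let src := pvSrc draws recent_n
  let counters : List (PySem.Dict String Int) := List.replicate 6 PySem.Dict.empty
  let counters := src.foldl (fun cs draw =>
      let num := pvDigits draw
      (PySem.List.enumerate num 0).foldl pvStepA cs) counters
  counters.map PySem.Dict.items

-- ===== PORT B =====
-- col = [s[pos] for s in digits]; Counter({ch: col.count(ch) for ch in dict.fromkeys(col)})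
def build_pos_counts_py_alt (draws : List (List (String × Int))) (recent_n : Option Int) : List (List (String × Int)) :=
  let src := pvSrc draws recent_n
  let digits := src.map pvDigits
  (PySem.List.pyRange 0 6 1).map (fun pos =>
    let col := digits.map (fun s => String.singleton (PySem.List.pyGetD s pos ' '))
    (PySem.List.dedup col).map (fun ch => (ch, (col.count ch : Int))))

-- ===== PRECONDITION & SPEC =====
-- Pre_ excludes exactly the inputs where the Python A raises: a draw in the selected window
-- without a "num" key (KeyError) or with str(num) longer than 6 chars (IndexError at counters[6]).
def Pre_build_pos_counts_py (draws : List (List (String × Int))) (recent_n : Option Int) : Prop :=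
  ∀ d ∈ pvSrc draws recent_n,
    ((List.lookup "num" d).map (fun v => decide (-99999 ≤ v ∧ v ≤ 999999))).getD false = true
instance (draws : List (List (String × Int))) (recent_n : Option Int) : Decidable (Pre_build_pos_counts_py draws recent_n) := by unfold Pre_build_pos_counts_py; infer_instance

def pvWitness_build_pos_counts_py : (List (List (String × Int))) × Option Int := ([[("num", 123456)]], none)

def Spec_build_pos_counts_py (draws : List (List (String × Int))) (recent_n : Option Int) (out : List (List (String × Int))) : Prop := out = build_pos_counts_py_alt draws recent_n
instance (draws : List (List (String × Int))) (recent_n : Option Int) (out : List (List (String × Int))) : Decidable (Spec_build_pos_counts_py draws recent_n out) := by unfold Spec_build_pos_counts_py; infer_instance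

-- ===== CLAIM (what is proved, stated in full; the proofs are below) =====
def Claim_equal_build_pos_counts_py : Prop := ∀ (draws : List (List (String × Int))) (recent_n : Option Int), Dom_build_pos_counts_py draws recent_n → Pre_build_pos_counts_py draws recent_n → Spec_build_pos_counts_py draws recent_n (build_pos_counts_py draws recent_n)

-- ===== LEMMAS AND PROOFS =====

-- one modification per column position; leftover chars past the end of the counter list are dropped
def pvApply : List (PySem.Dict String Int) → List Char → List (PySem.Dict String Int)
  | [], _ => []
  | cs, [] => cs
  | c :: cs, ch :: chs => c.modify (String.singleton ch) 0 (· + 1) :: pvApply cs chs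

theorem pvSetD_oob (cs : List (PySem.Dict String Int)) (n : Nat) (v : PySem.Dict String Int)
    (h : cs.length ≤ n) : PySem.List.pySetD cs (n : Int) v = cs := by
  have hn : ¬ n < cs.length := by omega
  simp [PySem.List.pySetD, PySem.List.pySet?, PySem.List.pyIdx?, hn]

theorem pvInner_noop (num : List Char) : ∀ (s : Nat) (cs : List (PySem.Dict String Int)),
    cs.length ≤ s → (PySem.List.enumerate num (s : Int)).foldl pvStepA cs = cs := by
  induction num with
  | nil => intro s cs _; simp [PySem.List.enumerate]
  | cons ch chs ih =>
    intro s cs h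
    rw [PySem.List.enumerate_cons, List.foldl_cons]
    have hstep : pvStepA cs ((s : Int), ch) = cs := by
      unfold pvStepA; exact pvSetD_oob cs s _ h
    rw [hstep]
    have hcast : (s : Int) + 1 = ((s + 1 : Nat) : Int) := by push_cast; ring
    rw [hcast, ih (s + 1) cs (by omega)]

theorem pvInner (num : List Char) : ∀ (pre rest : List (PySem.Dict String Int)),
    (PySem.List.enumerate num ((pre.length : Nat) : Int)).foldl pvStepA (pre ++ rest)
      = pre ++ pvApply rest num := by
  induction num with
  | nil => intro pre rest; cases rest <;> simp [PySem.List.enumerate, pvApply]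
  | cons ch chs ih =>
    intro pre rest
    rw [PySem.List.enumerate_cons, List.foldl_cons]
    cases rest with
    | nil =>
      rw [List.append_nil]
      have hstep : pvStepA pre ((pre.length : Int), ch) = pre := by
        unfold pvStepA; exact pvSetD_oob pre pre.length _ (le_refl _)
      rw [hstep]
      have hcast : (pre.length : Int) + 1 = ((pre.length + 1 : Nat) : Int) := by push_cast; ring
      rw [hcast, pvInner_noop chs (pre.length + 1) pre (by omega)]
      simp [pvApply]
    | cons c cs' =>
      have hstep : pvStepA (pre ++ c :: cs') ((pre.length : Int), ch)
          = (pre ++ [c.modify (String.singleton ch) 0 (· + 1)]) ++ cs' := by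
        simp [pvStepA, PySem.List.pyGetD_natCast, PySem.List.pySetD, PySem.List.pySet?,
          PySem.List.pyIdx?]
      rw [hstep]
      have hcast : (pre.length : Int) + 1
          = (((pre ++ [c.modify (String.singleton ch) 0 (· + 1)]).length : Nat) : Int) := by
        simp
      rw [hcast, ih]
      simp [pvApply]

def pvColFold (digits : List (List Char)) (j : Int) (c : PySem.Dict String Int) : PySem.Dict String Int :=
  (digits.map (fun s => String.singleton (PySem.List.pyGetD s j ' '))).foldl
    (fun d x => d.modify x 0 (· + 1)) c

theorem pvOuter : ∀ (digits : List (List Char)), (∀ s ∈ digits, 6 ≤ s.length) →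
    ∀ c0 c1 c2 c3 c4 c5 : PySem.Dict String Int,
    digits.foldl (fun cs num => (PySem.List.enumerate num 0).foldl pvStepA cs) [c0, c1, c2, c3, c4, c5]
      = [pvColFold digits 0 c0, pvColFold digits 1 c1, pvColFold digits 2 c2,
         pvColFold digits 3 c3, pvColFold digits 4 c4, pvColFold digits 5 c5] := by
  intro digits
  induction digits with
  | nil => intro _ c0 c1 c2 c3 c4 c5; simp [pvColFold]
  | cons num rest ih =>
    intro h c0 c1 c2 c3 c4 c5
    have hnum : 6 ≤ num.length := h num (by simp)
    rcases num with _ | ⟨a0, num⟩; · simp only [List.length_nil] at hnum; omega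
    rcases num with _ | ⟨a1, num⟩; · simp only [List.length_cons, List.length_nil] at hnum; omega
    rcases num with _ | ⟨a2, num⟩; · simp only [List.length_cons, List.length_nil] at hnum; omega
    rcases num with _ | ⟨a3, num⟩; · simp only [List.length_cons, List.length_nil] at hnum; omega
    rcases num with _ | ⟨a4, num⟩; · simp only [List.length_cons, List.length_nil] at hnum; omega
    rcases num with _ | ⟨a5, num⟩; · simp only [List.length_cons, List.length_nil] at hnum; omega
    rw [List.foldl_cons]
    have hin := pvInner (a0 :: a1 :: a2 :: a3 :: a4 :: a5 :: num) [] [c0, c1, c2, c3, c4, c5]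
    simp only [List.length_nil, Nat.cast_zero, List.nil_append] at hin
    have happ : pvApply [c0, c1, c2, c3, c4, c5] (a0 :: a1 :: a2 :: a3 :: a4 :: a5 :: num)
        = [c0.modify (String.singleton a0) 0 (· + 1), c1.modify (String.singleton a1) 0 (· + 1),
           c2.modify (String.singleton a2) 0 (· + 1), c3.modify (String.singleton a3) 0 (· + 1),
           c4.modify (String.singleton a4) 0 (· + 1), c5.modify (String.singleton a5) 0 (· + 1)] := rfl
    rw [hin, happ, ih (fun s hs => h s (by simp [hs]))]
    simp [pvColFold, PySem.List.pyGetD, PySem.List.pyGet?, PySem.List.pyIdx?]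

theorem pvZfill_len (s : List Char) : 6 ≤ (pvZfill s 6).length := by
  unfold pvZfill
  split
  · omega
  · split <;> simp <;> omega

theorem pvFoldl_map_digits (l : List (List (String × Int)))
    (init : List (PySem.Dict String Int)) :
    l.foldl (fun cs draw => (PySem.List.enumerate (pvDigits draw) 0).foldl pvStepA cs) init
      = (l.map pvDigits).foldl (fun cs num => (PySem.List.enumerate num 0).foldl pvStepA cs) init := by
  rw [List.foldl_map]

-- A's per-column fold from the empty dict is Counter(col); its items are B's dedup-then-count list
theorem pvColFold_items (digits : List (List Char)) (j : Int) :
    (pvColFold digits j PySem.Dict.empty).items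
      = (PySem.List.dedup (digits.map (fun s => String.singleton (PySem.List.pyGetD s j ' ')))).map
          (fun ch => (ch, ((digits.map (fun s => String.singleton (PySem.List.pyGetD s j ' '))).count ch : Int))) := by
  rw [pvColFold, ← PySem.Dict.counter_eq_foldl, PySem.Dict.items_counter]
  simp [PySem.List.dedup_eq_ofList]

-- ===== VERDICT (by name: the statement is the Claim_ definition above) =====
theorem build_pos_counts_py_spec : Claim_equal_build_pos_counts_py := by
  intro draws recent_n _ _
  show ((pvSrc draws recent_n).foldl
          (fun cs draw => (PySem.List.enumerate (pvDigits draw) 0).foldl pvStepA cs)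
          (List.replicate 6 PySem.Dict.empty)).map PySem.Dict.items
      = (PySem.List.pyRange 0 6 1).map (fun pos =>
          (PySem.List.dedup (((pvSrc draws recent_n).map pvDigits).map
              (fun s => String.singleton (PySem.List.pyGetD s pos ' ')))).map
            (fun ch => (ch, ((((pvSrc draws recent_n).map pvDigits).map
              (fun s => String.singleton (PySem.List.pyGetD s pos ' '))).count ch : Int))))
  have h6 : ∀ s ∈ (pvSrc draws recent_n).map pvDigits, 6 ≤ s.length := by
    intro s hs
    obtain ⟨d, _, rfl⟩ := List.mem_map.mp hs
    exact pvZfill_len _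
  rw [pvFoldl_map_digits]
  rw [show (List.replicate 6 (PySem.Dict.empty : PySem.Dict String Int))
      = [PySem.Dict.empty, PySem.Dict.empty, PySem.Dict.empty, PySem.Dict.empty,
         PySem.Dict.empty, PySem.Dict.empty] from rfl]
  rw [pvOuter _ h6]
  rw [show PySem.List.pyRange 0 6 1 = [0, 1, 2, 3, 4, 5] from by decide]
  simp only [List.map_cons, List.map_nil, pvColFold_items]
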